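-- pv_equiv track=rewrite | github.com/GizawAAiT/Codeforces | B_Triangles_on_a_Rectangle.py | solve
-- ===== SOURCE A (Python) =====
-- def solve(w, h, B, T, L, R):
--     INF = 10**30
--     best = INF
--
--     # Horizontal sides
--     for i in range(len(B)):
--         xi = B[i]
--         for j in range(i + 1, len(B)):
--             base = B[j] - xi
--             area2 = base * h
--             if area2 < best:
--                 best = area2
--
--     for i in range(len(T)):
--         xi = T[i]
--         for j in range(i + 1, len(T)):
--             base = T[j] - xi
--             area2 = base * h
--             if area2 < best:
--                 best = area2
--
--     # Vertical sides
--     for i in range(len(L)):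
--         yi = L[i]
--         for j in range(i + 1, len(L)):
--             base = L[j] - yi
--             area2 = base * w
--             if area2 < best:
--                 best = area2
--
--     for i in range(len(R)):
--         yi = R[i]
--         for j in range(i + 1, len(R)):
--             base = R[j] - yi
--             area2 = base * w
--             if area2 < best:
--                 best = area2
--
--     return best
-- ===== SOURCE B (Python) =====
-- def solve(w, h, B, T, L, R):
--     best = 10**30
--     for arr, m in ((B, h), (T, h), (L, w), (R, w)):
--         if arr:
--             pmax = pmin = arr[0]
--             for x in arr[1:]:
--                 c1 = (x - pmax) * m
--                 if c1 < best:
--                     best = c1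
--                 c2 = (x - pmin) * m
--                 if c2 < best:
--                     best = c2
--                 if x > pmax:
--                     pmax = x
--                 if x < pmin:
--                     pmin = x
--     return best
-- ===== Notes on version B (the rewrite author's own statement) =====
-- stated objective: faster
-- what changed: Replaces the O(n^2) all-pairs scan per array with a single O(n) pass that tracks the running prefix maximum and minimum (the pairwise minimum of (a[j]-a[i])*m is always attained at a prefix extremum).
import Mathlib
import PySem

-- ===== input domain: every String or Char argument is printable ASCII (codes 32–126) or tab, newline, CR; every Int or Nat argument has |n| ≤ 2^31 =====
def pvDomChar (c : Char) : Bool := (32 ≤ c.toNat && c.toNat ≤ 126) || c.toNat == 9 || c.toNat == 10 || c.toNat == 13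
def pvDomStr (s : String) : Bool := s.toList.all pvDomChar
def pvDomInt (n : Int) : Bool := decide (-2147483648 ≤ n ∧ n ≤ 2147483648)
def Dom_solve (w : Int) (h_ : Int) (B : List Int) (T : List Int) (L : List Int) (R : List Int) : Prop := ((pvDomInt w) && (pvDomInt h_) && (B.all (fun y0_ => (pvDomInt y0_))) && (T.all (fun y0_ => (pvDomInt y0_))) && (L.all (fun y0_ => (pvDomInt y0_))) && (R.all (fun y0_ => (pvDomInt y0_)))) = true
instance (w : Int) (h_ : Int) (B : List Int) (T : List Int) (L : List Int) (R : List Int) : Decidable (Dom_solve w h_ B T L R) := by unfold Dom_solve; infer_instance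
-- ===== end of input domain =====

-- B replaces A's O(n^2) all-pairs scan per array by one O(n) pass tracking the running
-- prefix maximum and minimum (objective: faster, asymptotic).

-- ===== PORT A =====
-- inner loop: for j in range(i+1, len(a)): area2 = (a[j] - xi) * m; if area2 < best: best = area2
def pvInnerA (m xi : Int) : List Int → Int → Int
  | [], best => best
  | y :: ys, best =>
      pvInnerA m xi ys (if (y - xi) * m < best then (y - xi) * m else best)

-- outer loop: for i in range(len(a)): xi = a[i]; <inner loop over the elements after i>
def pvOuterA (m : Int) : List Int → Int → Int
  | [], best => best
  | x :: xs, best => pvOuterA m xs (pvInnerA m x xs best)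

def solve (w : Int) (h_ : Int) (B : List Int) (T : List Int) (L : List Int) (R : List Int) : Int :=
  let best : Int := 10 ^ 30
  let best := pvOuterA h_ B best
  let best := pvOuterA h_ T best
  let best := pvOuterA w L best
  let best := pvOuterA w R best
  best

-- ===== PORT B =====
-- for x in arr[1:]: try x against prefix max and prefix min, update them
def pvPassB (m : Int) : List Int → Int → Int → Int → Int
  | [], _, _, best => best
  | x :: xs, pmax, pmin, best =>
      let c1 := (x - pmax) * m
      let best := if c1 < best then c1 else best
      let c2 := (x - pmin) * m
      let best := if c2 < best then c2 else best
      pvPassB m xs (if x > pmax then x else pmax) (if x < pmin then x else pmin) best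

def pvArrB (m : Int) (arr : List Int) (best : Int) : Int :=
  match arr with
  | [] => best
  | x :: xs => pvPassB m xs x x best

def solve_alt (w : Int) (h_ : Int) (B : List Int) (T : List Int) (L : List Int) (R : List Int) : Int :=
  pvArrB w R (pvArrB w L (pvArrB h_ T (pvArrB h_ B (10 ^ 30))))

-- ===== PRECONDITION & SPEC =====
def Spec_solve (w : Int) (h_ : Int) (B : List Int) (T : List Int) (L : List Int) (R : List Int) (out : Int) : Prop := out = solve_alt w h_ B T L R
instance (w : Int) (h_ : Int) (B : List Int) (T : List Int) (L : List Int) (R : List Int) (out : Int) : Decidable (Spec_solve w h_ B T L R out) := by unfold Spec_solve; infer_instance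

-- ===== CLAIM (what is proved, stated in full; the proofs are below) =====
def Claim_equal_solve : Prop := ∀ (w : Int) (h_ : Int) (B : List Int) (T : List Int) (L : List Int) (R : List Int), Dom_solve w h_ B T L R → Spec_solve w h_ B T L R (solve w h_ B T L R)

-- ===== LEMMAS AND PROOFS =====

lemma pv_if_lt_eq_min (a b : Int) : (if a < b then a else b) = min a b := by
  rw [min_def]; split <;> split <;> omega

/-- Running minimum of a list of candidates folded into `best`. -/
def pvMinList (best : Int) (l : List Int) : Int := l.foldl (fun b v => min v b) best

/-- The candidate values A's pair of nested loops considers, in order. -/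
def pvPairVals (m : Int) : List Int → List Int
  | [] => []
  | x :: xs => xs.map (fun y => (y - x) * m) ++ pvPairVals m xs

/-- The candidate values B's pass considers, in order. -/
def pvBVals (m : Int) : List Int → Int → Int → List Int
  | [], _, _ => []
  | x :: xs, pmax, pmin =>
      (x - pmax) * m :: (x - pmin) * m ::
        pvBVals m xs (if x > pmax then x else pmax) (if x < pmin then x else pmin)

lemma pvInnerA_eq (m xi : Int) : ∀ (ys : List Int) (best : Int),
    pvInnerA m xi ys best = pvMinList best (ys.map (fun y => (y - xi) * m)) := by
  intro ys
  induction ys with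
  | nil => intro best; rfl
  | cons y ys ih =>
      intro best
      show pvInnerA m xi ys (if (y - xi) * m < best then (y - xi) * m else best) = _
      rw [ih, pv_if_lt_eq_min]
      rfl

lemma pvMinList_append (best : Int) (l₁ l₂ : List Int) :
    pvMinList best (l₁ ++ l₂) = pvMinList (pvMinList best l₁) l₂ := by
  simp [pvMinList, List.foldl_append]

lemma pvOuterA_eq (m : Int) : ∀ (l : List Int) (best : Int),
    pvOuterA m l best = pvMinList best (pvPairVals m l) := by
  intro l
  induction l with
  | nil => intro best; rfl
  | cons x xs ih =>
      intro best
      simp only [pvOuterA, pvPairVals, pvMinList_append, ih, pvInnerA_eq]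

lemma pvPassB_eq (m : Int) : ∀ (xs : List Int) (pmax pmin best : Int),
    pvPassB m xs pmax pmin best = pvMinList best (pvBVals m xs pmax pmin) := by
  intro xs
  induction xs with
  | nil => intro pmax pmin best; rfl
  | cons x xs ih =>
      intro pmax pmin best
      have hstep : pvPassB m (x :: xs) pmax pmin best
          = pvPassB m xs (if x > pmax then x else pmax) (if x < pmin then x else pmin)
              (if (x - pmin) * m < (if (x - pmax) * m < best then (x - pmax) * m else best)
                then (x - pmin) * m
                else (if (x - pmax) * m < best then (x - pmax) * m else best)) := rfl
      have hacc : (if (x - pmin) * m < (if (x - pmax) * m < best then (x - pmax) * m else best)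
            then (x - pmin) * m
            else (if (x - pmax) * m < best then (x - pmax) * m else best))
          = min ((x - pmin) * m) (min ((x - pmax) * m) best) := by
        simp only [pv_if_lt_eq_min]
      rw [hstep, hacc, ih]
      rfl

lemma pvMinList_le (best : Int) : ∀ (l : List Int), pvMinList best l ≤ best := by
  intro l
  induction l generalizing best with
  | nil => simp [pvMinList]
  | cons v l ih =>
      calc pvMinList best (v :: l) = pvMinList (min v best) l := rfl
        _ ≤ min v best := ih _
        _ ≤ best := min_le_right _ _

lemma pvMinList_le_mem (best : Int) : ∀ (l : List Int) (v : Int), v ∈ l → pvMinList best l ≤ v := by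
  intro l
  induction l generalizing best with
  | nil => intro v hv; simp at hv
  | cons u l ih =>
      intro v hv
      rcases List.mem_cons.mp hv with h | h
      · subst h
        calc pvMinList best (v :: l) = pvMinList (min v best) l := rfl
          _ ≤ min v best := pvMinList_le _ _
          _ ≤ v := min_le_left _ _
      · exact ih _ _ h

lemma pvMinList_cases (best : Int) : ∀ (l : List Int),
    pvMinList best l = best ∨ pvMinList best l ∈ l := by
  intro l
  induction l generalizing best with
  | nil => left; rfl
  | cons v l ih =>
      have hrec : pvMinList best (v :: l) = pvMinList (min v best) l := rfl
      rw [hrec]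
      rcases ih (min v best) with h | h
      · rw [h]
        rcases le_total v best with hvb | hvb
        · right; rw [min_eq_left hvb]; exact List.mem_cons_self ..
        · left; rw [min_eq_right hvb]
      · right; right; exact h

lemma pvMinList_antisymm (best : Int) (l₁ l₂ : List Int)
    (h₁ : ∀ v ∈ l₁, ∃ u ∈ l₂, u ≤ v) (h₂ : ∀ v ∈ l₂, ∃ u ∈ l₁, u ≤ v) :
    pvMinList best l₁ = pvMinList best l₂ := by
  apply le_antisymm
  · rcases pvMinList_cases best l₂ with h | h
    · rw [h]; exact pvMinList_le _ _
    · obtain ⟨u, hu, hule⟩ := h₂ _ h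
      calc pvMinList best l₁ ≤ u := pvMinList_le_mem _ _ _ hu
        _ ≤ pvMinList best l₂ := hule
  · rcases pvMinList_cases best l₁ with h | h
    · rw [h]; exact pvMinList_le _ _
    · obtain ⟨u, hu, hule⟩ := h₁ _ h
      calc pvMinList best l₂ ≤ u := pvMinList_le_mem _ _ _ hu
        _ ≤ pvMinList best l₁ := hule

/-- A genuine pair value with left element in `pref` and right element in `xs`
is among the pair values of `pref ++ xs`. -/
lemma pvMem_pairVals_append (m : Int) : ∀ (pref xs : List Int) (p y : Int),
    p ∈ pref → y ∈ xs → (y - p) * m ∈ pvPairVals m (pref ++ xs) := by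
  intro pref
  induction pref with
  | nil => intro xs p y hp; simp at hp
  | cons q pref ih =>
      intro xs p y hp hy
      simp only [List.cons_append, pvPairVals, List.mem_append, List.mem_map]
      rcases List.mem_cons.mp hp with h | h
      · subst h
        left
        exact ⟨y, Or.inr hy, rfl⟩
      · right
        exact ih xs p y h hy

/-- Every candidate B considers is a genuine pair value, provided the running
extrema are themselves elements of the prefix. -/
lemma pvBVals_subset (m : Int) : ∀ (xs pref : List Int) (pmax pmin : Int),
    pmax ∈ pref → pmin ∈ pref →
    ∀ u ∈ pvBVals m xs pmax pmin, u ∈ pvPairVals m (pref ++ xs) := by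
  intro xs
  induction xs with
  | nil => intro pref pmax pmin _ _ u hu; simp [pvBVals] at hu
  | cons x xs ih =>
      intro pref pmax pmin hmax hmin u hu
      simp only [pvBVals, List.mem_cons] at hu
      rcases hu with h | h | h
      · subst h
        exact pvMem_pairVals_append m pref (x :: xs) pmax x hmax (List.mem_cons_self ..)
      · subst h
        exact pvMem_pairVals_append m pref (x :: xs) pmin x hmin (List.mem_cons_self ..)
      · have h1 : (if x > pmax then x else pmax) ∈ pref ++ [x] := by
          split
          · exact List.mem_append_right _ (List.mem_singleton.mpr rfl)
          · exact List.mem_append_left _ hmax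
        have h2 : (if x < pmin then x else pmin) ∈ pref ++ [x] := by
          split
          · exact List.mem_append_right _ (List.mem_singleton.mpr rfl)
          · exact List.mem_append_left _ hmin
        have := ih (pref ++ [x]) _ _ h1 h2 u h
        simpa [List.append_assoc] using this

/-- For any `p` between the running extrema, every later pair value `(y - p) * m`
is dominated by some candidate of B's pass. -/
lemma pvB_dominates_point (m : Int) : ∀ (xs : List Int) (pmax pmin p : Int),
    pmin ≤ p → p ≤ pmax →
    ∀ y ∈ xs, ∃ u ∈ pvBVals m xs pmax pmin, u ≤ (y - p) * m := by
  intro xs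
  induction xs with
  | nil => intro pmax pmin p _ _ y hy; simp at hy
  | cons x xs ih =>
      intro pmax pmin p hp1 hp2 y hy
      rcases List.mem_cons.mp hy with h | h
      · subst h
        rcases le_total 0 m with hm | hm
        · refine ⟨(y - pmax) * m, by simp [pvBVals], ?_⟩
          have hle : y - pmax ≤ y - p := by omega
          exact mul_le_mul_of_nonneg_right hle hm
        · refine ⟨(y - pmin) * m, by simp [pvBVals], ?_⟩
          have hle : y - p ≤ y - pmin := by omega
          exact mul_le_mul_of_nonpos_right hle hm
      · have h1 : (if x < pmin then x else pmin) ≤ p := by split <;> omega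
        have h2 : p ≤ (if x > pmax then x else pmax) := by split <;> omega
        obtain ⟨u, hu, hule⟩ :=
          ih (if x > pmax then x else pmax) (if x < pmin then x else pmin) p h1 h2 y h
        exact ⟨u, by simp [pvBVals, hu], hule⟩

/-- Every pair value of A (over the same list) is dominated by a candidate of B's pass. -/
lemma pvB_dominates (m : Int) : ∀ (xs : List Int) (pmax pmin : Int),
    ∀ v ∈ pvPairVals m xs, ∃ u ∈ pvBVals m xs pmax pmin, u ≤ v := by
  intro xs
  induction xs with
  | nil => intro pmax pmin v hv; simp [pvPairVals] at hv
  | cons x xs ih =>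
      intro pmax pmin v hv
      simp only [pvPairVals, List.mem_append, List.mem_map] at hv
      rcases hv with ⟨y, hy, rfl⟩ | hv
      · -- pair with left element x: x lies between the updated extrema
        have h1 : (if x < pmin then x else pmin) ≤ x := by split <;> omega
        have h2 : x ≤ (if x > pmax then x else pmax) := by split <;> omega
        obtain ⟨u, hu, hule⟩ :=
          pvB_dominates_point m xs (if x > pmax then x else pmax) (if x < pmin then x else pmin) x h1 h2 y hy
        exact ⟨u, by simp [pvBVals, hu], hule⟩
      · obtain ⟨u, hu, hule⟩ := ih (if x > pmax then x else pmax) (if x < pmin then x else pmin) v hv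
        exact ⟨u, by simp [pvBVals, hu], hule⟩

/-- Per-array equality of A's nested loops and B's single pass. -/
lemma pvArr_eq (m : Int) (l : List Int) (best : Int) :
    pvOuterA m l best = pvArrB m l best := by
  cases l with
  | nil => rfl
  | cons x xs =>
      have hA : pvOuterA m (x :: xs) best = pvMinList best (pvPairVals m (x :: xs)) :=
        pvOuterA_eq m _ best
      have hB : pvArrB m (x :: xs) best = pvMinList best (pvBVals m xs x x) := by
        simp only [pvArrB]
        exact pvPassB_eq m xs x x best
      rw [hA, hB]
      apply pvMinList_antisymm
      · intro v hv
        simp only [pvPairVals, List.mem_append, List.mem_map] at hv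
        rcases hv with ⟨y, hy, rfl⟩ | hv
        · exact pvB_dominates_point m xs x x x (le_refl x) (le_refl x) y hy
        · exact pvB_dominates m xs x x v hv
      · intro u hu
        refine ⟨u, ?_, le_refl u⟩
        have := pvBVals_subset m xs [x] x x (List.mem_singleton.mpr rfl) (List.mem_singleton.mpr rfl) u hu
        simpa using this

-- ===== VERDICT (by name: the statement is the Claim_ definition above) =====
theorem solve_spec : Claim_equal_solve := by
  intro w h_ B T L R _
  show solve w h_ B T L R = solve_alt w h_ B T L R
  simp only [solve, solve_alt, pvArr_eq]
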